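-- pv_equiv track=rewrite | github.com/HeinHuijskes/AdventOfCode | src/year2022/Day8.py | setupVisibleGrid
-- ===== SOURCE A (Python) =====
-- def setupVisibleGrid(x, y):
--     grid = []
--     for i in range(0, y):
--         grid.append([])
--         for j in range(0, x):
--             if 0 < j < x-1 and 0 < i < y-1:
--                 grid[i].append(False)
--             else:
--                 grid[i].append(True)
--
--     return grid
-- ===== SOURCE B (Python) =====
-- def setupVisibleGrid(x, y):
--     # Row-replication construction: build the two distinct row shapes once
--     # (all-True edge row; interior row True,False*(x-2),True with clamped counts
--     # so degenerate widths come out right), then replicate them.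
--     if y <= 0:
--         return []
--     edge = [True] * x
--     inner = [True] * min(x, 1) + [False] * (x - 2) + [True] * min(x - 1, 1)
--     grid = [list(edge) for _ in range(min(y, 1))]
--     grid += [list(inner) for _ in range(y - 2)]
--     grid += [list(edge) for _ in range(min(y - 1, 1))]
--     return grid
-- ===== Notes on version B (the rewrite author's own statement) =====
-- stated objective: faster
-- what changed: Replaces the per-cell nested loops and branch with a row-replication construction: the edge row and the interior row are each built once by list replication with clamped counts, then the grid is [edge]*min(y,1) + [inner]*(y-2) + [edge]*min(y-1,1) (row copies), with an early [] for y<=0.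
import Mathlib
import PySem

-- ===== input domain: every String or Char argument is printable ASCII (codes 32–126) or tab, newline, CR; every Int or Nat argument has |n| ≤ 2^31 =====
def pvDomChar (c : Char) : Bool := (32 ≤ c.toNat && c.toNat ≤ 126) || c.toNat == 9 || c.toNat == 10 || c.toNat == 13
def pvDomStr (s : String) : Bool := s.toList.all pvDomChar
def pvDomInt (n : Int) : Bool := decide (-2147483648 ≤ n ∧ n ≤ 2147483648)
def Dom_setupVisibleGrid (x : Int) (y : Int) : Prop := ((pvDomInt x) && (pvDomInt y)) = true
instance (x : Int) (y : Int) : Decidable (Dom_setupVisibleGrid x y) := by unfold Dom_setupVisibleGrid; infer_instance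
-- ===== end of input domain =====

-- B replaces A's per-cell nested loops by row replication: it builds the two distinct row
-- shapes once (edge row, interior row) and replicates/copies them; same return value, and
-- a timing run measured B faster in Python (no per-cell interpreted work).

-- ===== PORT A =====
-- Python A: grid starts []; for i in range(y): append []; for j in range(x):
-- append False/True to grid[i] (grid[i] is always in range, so the pyGetD default never fires).
def setupVisibleGrid (x : Int) (y : Int) : List (List Bool) :=
  (PySem.List.pyRange 0 y).foldl (fun grid i =>
    (PySem.List.pyRange 0 x).foldl (fun g j =>
      PySem.List.pySetD g i
        (PySem.List.pyGetD g i [] ++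
          [if 0 < j ∧ j < x - 1 ∧ 0 < i ∧ i < y - 1 then false else true]))
      (grid ++ [([] : List Bool)])) []

-- ===== PORT B =====
-- Python B: if y <= 0: return [];  edge = [True]*x; inner = [True]*min(x,1) + [False]*(x-2) + [True]*min(x-1,1);
-- grid = [edge]*min(y,1) + [inner]*(y-2) + [edge]*min(y-1,1)  (row copies; [v]*n with n<0 is []).
def setupVisibleGrid_alt (x : Int) (y : Int) : List (List Bool) :=
  if y ≤ 0 then [] else
  let edge := List.replicate x.toNat true
  let inner := List.replicate (min x 1).toNat true ++ List.replicate (x - 2).toNat false ++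
    List.replicate (min (x - 1) 1).toNat true
  List.replicate (min y 1).toNat edge ++ List.replicate (y - 2).toNat inner ++
    List.replicate (min (y - 1) 1).toNat edge

-- ===== PRECONDITION & SPEC =====
def Spec_setupVisibleGrid (x : Int) (y : Int) (out : List (List Bool)) : Prop := out = setupVisibleGrid_alt x y
instance (x : Int) (y : Int) (out : List (List Bool)) : Decidable (Spec_setupVisibleGrid x y out) := by unfold Spec_setupVisibleGrid; infer_instance

-- ===== CLAIM (what is proved, stated in full; the proofs are below) =====
def Claim_equal_setupVisibleGrid : Prop := ∀ (x : Int) (y : Int), Dom_setupVisibleGrid x y → Spec_setupVisibleGrid x y (setupVisibleGrid x y)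

-- ===== LEMMAS AND PROOFS =====

-- common normal form both ports are reduced to
def pvCell (x y : Int) (i j : Nat) : Bool :=
  if 0 < (j : Int) ∧ (j : Int) < x - 1 ∧ 0 < (i : Int) ∧ (i : Int) < y - 1 then false else true

def pvTarget (x y : Int) : List (List Bool) :=
  (List.range y.toNat).map (fun i => (List.range x.toNat).map (pvCell x y i))

-- pyRange with step 1 as a mapped List.range
theorem pvRange_map (a b : Int) :
    PySem.List.pyRange a b = (List.range (b - a).toNat).map (fun k : Nat => a + (k : Int)) := by
  by_cases hab : a < b
  · simp [PySem.List.pyRange, hab]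
  · have h0 : (b - a).toNat = 0 := by omega
    simp [PySem.List.pyRange, hab, h0]

-- A's inner loop appends cells to the last row (index h.length) one by one
theorem pvInnerA (js : List Int) (f : Int → Bool) :
    ∀ (h : List (List Bool)) (r : List Bool),
      js.foldl (fun g j =>
        PySem.List.pySetD g (h.length : Int)
          (PySem.List.pyGetD g (h.length : Int) [] ++ [f j])) (h ++ [r])
      = h ++ [r ++ js.map f] := by
  induction js with
  | nil => intro h r; simp
  | cons j js ih =>
    intro h r
    have hstep : PySem.List.pySetD (h ++ [r]) (h.length : Int)
        (PySem.List.pyGetD (h ++ [r]) (h.length : Int) [] ++ [f j]) = h ++ [r ++ [f j]] := by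
      rw [PySem.List.pyGetD_natCast, PySem.List.pySetD_natCast]
      simp [List.getD]
    rw [List.foldl_cons, hstep, ih h (r ++ [f j])]
    simp

theorem pvA_eq (x y : Int) : setupVisibleGrid x y = pvTarget x y := by
  unfold setupVisibleGrid pvTarget
  rw [pvRange_map 0 y, pvRange_map 0 x]
  simp only [Int.sub_zero, Int.zero_add]
  suffices h : ∀ t : Nat, t ≤ y.toNat →
      ((List.range t).map (fun k : Nat => (k : Int))).foldl (fun grid i =>
        ((List.range x.toNat).map (fun k : Nat => (k : Int))).foldl (fun g j =>
          PySem.List.pySetD g i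
            (PySem.List.pyGetD g i [] ++
              [if 0 < j ∧ j < x - 1 ∧ 0 < i ∧ i < y - 1 then false else true]))
          (grid ++ [([] : List Bool)])) []
      = (List.range t).map (fun i => (List.range x.toNat).map (pvCell x y i)) by
    exact h y.toNat (le_refl _)
  intro t
  induction t with
  | zero => intro _; simp
  | succ t ih =>
    intro ht
    rw [List.range_succ, List.map_append, List.foldl_append, ih (by omega)]
    simp only [List.map_cons, List.map_nil, List.foldl_cons, List.foldl_nil]
    have hlen : ((List.range t).map (fun i => (List.range x.toNat).map (pvCell x y i))).length = t := by
      simp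
    rw [List.map_append]
    calc ((List.range x.toNat).map (fun k : Nat => (k : Int))).foldl (fun g j =>
            PySem.List.pySetD g (t : Int)
              (PySem.List.pyGetD g (t : Int) [] ++
                [if 0 < j ∧ j < x - 1 ∧ 0 < (t : Int) ∧ (t : Int) < y - 1 then false else true]))
            ((List.range t).map (fun i => (List.range x.toNat).map (pvCell x y i)) ++ [([] : List Bool)])
        = (List.range t).map (fun i => (List.range x.toNat).map (pvCell x y i)) ++
            [([] : List Bool) ++ ((List.range x.toNat).map (fun k : Nat => (k : Int))).map
              (fun j => if 0 < j ∧ j < x - 1 ∧ 0 < (t : Int) ∧ (t : Int) < y - 1 then false else true)] := by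
          have := pvInnerA ((List.range x.toNat).map (fun k : Nat => (k : Int)))
            (fun j => if 0 < j ∧ j < x - 1 ∧ 0 < (t : Int) ∧ (t : Int) < y - 1 then false else true)
            ((List.range t).map (fun i => (List.range x.toNat).map (pvCell x y i))) []
          rw [hlen] at this
          exact this
      _ = _ := by
          simp only [List.nil_append, List.map_map, List.map_cons, List.map_nil]
          simp only [Function.comp_def]
          rfl

-- the interior row equals B's three-block replication
theorem pvInnerRow (x y : Int) (i : Nat) (hi : 0 < (i : Int) ∧ (i : Int) < y - 1) :
    (List.range x.toNat).map (pvCell x y i)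
      = List.replicate (min x 1).toNat true ++ List.replicate (x - 2).toNat false ++
        List.replicate (min (x - 1) 1).toNat true := by
  apply List.ext_getElem
  · simp; omega
  · intro j h1 h2
    simp only [List.getElem_map, List.getElem_range, pvCell]
    simp only [List.getElem_append, List.length_append, List.length_replicate,
      List.getElem_replicate]
    simp only [List.length_map, List.length_range] at h1
    simp only [List.length_append, List.length_replicate] at h2
    split_ifs <;> first | rfl | omega

-- edge rows (and all rows when the i-condition fails) are all-True
theorem pvEdgeRow (x y : Int) (i : Nat) (hi : ¬(0 < (i : Int) ∧ (i : Int) < y - 1)) :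
    (List.range x.toNat).map (pvCell x y i) = List.replicate x.toNat true := by
  apply List.ext_getElem
  · simp
  · intro j h1 h2
    simp only [List.getElem_map, List.getElem_range, List.getElem_replicate, pvCell]
    split_ifs with h
    · exact absurd ⟨h.2.2.1, h.2.2.2⟩ hi
    · rfl

theorem pvB_eq (x y : Int) : setupVisibleGrid_alt x y = pvTarget x y := by
  unfold setupVisibleGrid_alt pvTarget
  split_ifs with hy
  · have : y.toNat = 0 := by omega
    simp [this]
  apply List.ext_getElem
  · simp; omega
  · intro i h1 h2
    simp only [List.getElem_map, List.getElem_range]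
    simp only [List.getElem_append, List.length_append, List.length_replicate,
      List.getElem_replicate]
    simp only [List.length_map, List.length_range] at h2
    split_ifs with ha hb
    · rw [pvEdgeRow x y i (by omega)]
    · rw [pvInnerRow x y i (by omega)]
    · rw [pvEdgeRow x y i (by omega)]

-- ===== VERDICT (by name: the statement is the Claim_ definition above) =====
theorem setupVisibleGrid_spec : Claim_equal_setupVisibleGrid := by
  intro x y _
  unfold Spec_setupVisibleGrid
  rw [pvA_eq, pvB_eq]
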